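-- pv_equiv track=rewrite | github.com/pypi-data/pypi-mirror-119 | packages/vidtest/vidtest-0.0.2-py3-none-any.whl/vidtest/pluto.py | ocr_cleanup
-- ===== SOURCE A (Python) =====
-- def ocr_cleanup(text: str):  # -> str
--     """Removes unwanted characters or symbols from a text
--
--     This includes \n, \x0c, and multiple ' '
--
--     Args:
--         text: The String for cleanup.
--
--     Returns:
--         The cleaned text as String.
--     """
--     out = text.replace("\n", " ")
--     out = out.replace("\x0c", "")
--     out = " ".join(out.split())
--
--     splits = out.split(",")
--     clean_splits = []
--
--     for phrase in splits:
--         arr = list(phrase)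
--         l = len(arr)
--         start = 0
--         end = l
--         for i in range(0, l):
--             if arr[i] == " ": start += 1
--             else: break
--         for i in range(l, 0, -1):
--             if arr[i-1] == " ": end -= 1
--             else: break
--         clean_splits.append(phrase[start:end])
--
--     out = ""
--     for phrase in clean_splits:
--         out += phrase
--         out += ", "
--     out = out[:-2]
--
--     return out
-- ===== SOURCE B (Python) =====
-- def ocr_cleanup(text: str):  # -> str
--     """Same cleanup as A, but normalizes comma spacing in one left-to-right scan
--     instead of split-on-comma / per-phrase trimming / re-join."""
--     s = " ".join(text.replace("\n", " ").replace("\x0c", "").split())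
--     out = []
--     i = 0
--     n = len(s)
--     while i < n:
--         c = s[i]
--         if c == ",":
--             out.append(", ")
--             i += 2 if i + 1 < n and s[i + 1] == " " else 1
--         elif c == " " and i + 1 < n and s[i + 1] == ",":
--             i += 1
--         else:
--             out.append(c)
--             i += 1
--     return "".join(out)
-- ===== Notes on version B (the rewrite author's own statement) =====
-- stated objective: alternative
-- what changed: After the shared whitespace normalization, B replaces A's split-on-comma / per-phrase manual trim loops / rebuild-with-separator-and-chop pipeline by a single left-to-right scan that drops the one possible space adjacent to each comma and emits comma-plus-space in its place.
import Mathlib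
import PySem

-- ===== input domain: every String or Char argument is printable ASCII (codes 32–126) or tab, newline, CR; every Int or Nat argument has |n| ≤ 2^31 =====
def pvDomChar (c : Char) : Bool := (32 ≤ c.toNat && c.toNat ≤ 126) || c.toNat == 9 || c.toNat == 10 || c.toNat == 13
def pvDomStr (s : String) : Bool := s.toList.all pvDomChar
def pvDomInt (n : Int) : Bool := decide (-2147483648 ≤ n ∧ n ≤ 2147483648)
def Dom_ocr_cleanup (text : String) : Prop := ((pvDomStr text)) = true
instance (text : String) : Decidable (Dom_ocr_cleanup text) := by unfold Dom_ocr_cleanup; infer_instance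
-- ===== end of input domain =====

-- B rewrites A's comma-spacing normalization (split on ',', per-phrase trim loops, rebuild and chop)
-- as one left-to-right scan; same return value, no side effects in either version.

-- ===== PORT A =====
-- 'for i in range(0, l): if arr[i] == " ": start += 1 else: break' — counts leading spaces
def aLead : List Char → Nat
  | [] => 0
  | c :: rest => if c = ' ' then aLead rest + 1 else 0

-- 'for i in range(l, 0, -1): if arr[i-1] == " ": end -= 1 else: break' examines arr[i-1] from the
-- right end; it is the same counting loop run on the reversed list
def aTrail (arr : List Char) : Nat := aLead arr.reverse

def ocr_cleanup (text : String) : String :=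
  let out1 := PySem.Str.replace text "\n" " "
  let out2 := PySem.Str.replace out1 "\x0C" ""
  let out3 := PySem.Str.join " " (PySem.Str.split₀ out2)
  let splits := PySem.Chars.splitOn out3.toList [',']
  let cleanSplits := splits.map (fun phrase =>
    let l := phrase.length
    let start := aLead phrase
    let stop := l - aTrail phrase        -- 'end' in the Python; its decrements keep 0 ≤ end ≤ l
    PySem.Chars.slice phrase (some (start : Int)) (some (stop : Int)))
  let out4 := cleanSplits.foldl (fun acc p => acc ++ p ++ [',', ' ']) []
  String.ofList (PySem.Chars.slice out4 none (some (-2)))    -- out[:-2]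

-- ===== PORT B =====
-- the while loop of Source B: emit ', ' for a comma (skipping one following space), skip a space
-- that directly precedes a comma, copy everything else
def altLoop : List Char → List Char
  | [] => []
  | c :: rest =>
    if c = ',' then
      ',' :: ' ' :: altLoop (if rest.head? = some ' ' then rest.tail else rest)
    else if c = ' ' ∧ rest.head? = some ',' then
      altLoop rest
    else
      c :: altLoop rest
termination_by cs => cs.length
decreasing_by
  · simp only [List.length_cons]
    split <;> simp [List.length_tail]
  · simp
  · simp

def ocr_cleanup_alt (text : String) : String :=
  let s := PySem.Str.join " " (PySem.Str.split₀
             (PySem.Str.replace (PySem.Str.replace text "\n" " ") "\x0C" ""))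
  String.ofList (altLoop s.toList)

-- ===== PRECONDITION & SPEC =====
def Spec_ocr_cleanup (text : String) (out : String) : Prop := out = ocr_cleanup_alt text
instance (text : String) (out : String) : Decidable (Spec_ocr_cleanup text out) := by unfold Spec_ocr_cleanup; infer_instance

-- ===== CLAIM (what is proved, stated in full; the proofs are below) =====
def Claim_equal_ocr_cleanup : Prop := ∀ (text : String), Dom_ocr_cleanup text → Spec_ocr_cleanup text (ocr_cleanup text)

-- ===== LEMMAS AND PROOFS =====

-- proof-side abstractions
def ldropSp (cs : List Char) : List Char := cs.dropWhile (· == ' ')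
def rdropSp (cs : List Char) : List Char := List.rdropWhile (· == ' ') cs
def trimSp (cs : List Char) : List Char := rdropSp (ldropSp cs)

def splitC : List Char → List (List Char)
  | [] => [[]]
  | c :: r =>
    if c = ',' then [] :: splitC r
    else match splitC r with
      | [] => [[c]]
      | p :: ps => (c :: p) :: ps

def joinCS : List (List Char) → List Char
  | [] => []
  | [p] => p
  | p :: q :: r => p ++ ',' :: ' ' :: joinCS (q :: r)

def A2 (cs : List Char) : List Char := joinCS ((splitC cs).map trimSp)

def NoDbl (cs : List Char) : Prop := cs.IsChain (fun a b => a = ' ' → b ≠ ' ')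
def GoodS (cs : List Char) : Prop := NoDbl cs ∧ cs.head? ≠ some ' ' ∧ cs.getLast? ≠ some ' '

theorem splitC_ne_nil (cs : List Char) : splitC cs ≠ [] := by
  cases cs with
  | nil => simp [splitC]
  | cons c r =>
    simp only [splitC]
    split
    · simp
    · split <;> simp

theorem splitC_comma (r : List Char) : splitC (',' :: r) = [] :: splitC r := by simp [splitC]

theorem splitC_cons {c : Char} (hc : c ≠ ',') (r : List Char) :
    splitC (c :: r) = (c :: (splitC r).headI) :: (splitC r).tail := by
  simp only [splitC, if_neg hc]
  cases hsr : splitC r with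
  | nil => exact absurd hsr (splitC_ne_nil r)
  | cons p ps => simp

theorem splitC_headI_tail (cs : List Char) :
    (splitC cs).headI :: (splitC cs).tail = splitC cs := by
  cases h : splitC cs with
  | nil => exact absurd h (splitC_ne_nil cs)
  | cons p ps => simp

-- trimming facts
theorem rdropSp_space_singleton : rdropSp [' '] = [] := by
  simp [rdropSp, List.rdropWhile_singleton]

theorem rdropSp_cons_nonspace {c : Char} (hc : c ≠ ' ') (p : List Char) :
    rdropSp (c :: p) = c :: rdropSp p := by
  unfold rdropSp
  induction p using List.reverseRecOn with
  | nil => simp [List.rdropWhile_singleton, hc]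
  | append_singleton q x ih =>
    by_cases hx : (x == ' ') = true
    · rw [show c :: (q ++ [x]) = (c :: q) ++ [x] by simp,
          List.rdropWhile_concat_pos (· == ' ') (c :: q) x hx, ih,
          List.rdropWhile_concat_pos (· == ' ') q x hx]
    · rw [show c :: (q ++ [x]) = (c :: q) ++ [x] by simp,
          List.rdropWhile_concat_neg (· == ' ') (c :: q) x hx,
          List.rdropWhile_concat_neg (· == ' ') q x hx]
      simp

theorem rdropSp_cons_of_ne_nil (x : Char) {q : List Char} (h : rdropSp q ≠ []) :
    rdropSp (x :: q) = x :: rdropSp q := by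
  unfold rdropSp at *
  induction q using List.reverseRecOn with
  | nil => simp at h
  | append_singleton q' y ih =>
    by_cases hy : (y == ' ') = true
    · rw [List.rdropWhile_concat_pos (· == ' ') q' y hy] at h
      rw [show x :: (q' ++ [y]) = (x :: q') ++ [y] by simp,
          List.rdropWhile_concat_pos (· == ' ') (x :: q') y hy, ih h,
          List.rdropWhile_concat_pos (· == ' ') q' y hy]
    · rw [show x :: (q' ++ [y]) = (x :: q') ++ [y] by simp,
          List.rdropWhile_concat_neg (· == ' ') (x :: q') y hy,
          List.rdropWhile_concat_neg (· == ' ') q' y hy]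
      simp

theorem trimSp_space (p : List Char) : trimSp (' ' :: p) = trimSp p := by
  simp [trimSp, ldropSp]

theorem trimSp_cons {c : Char} (hc : c ≠ ' ') (p : List Char) :
    trimSp (c :: p) = c :: rdropSp p := by
  simp only [trimSp, ldropSp, List.dropWhile_cons]
  rw [if_neg (by simpa using hc)]
  exact rdropSp_cons_nonspace hc p

theorem aLead_eq (cs : List Char) : aLead cs = (cs.takeWhile (· == ' ')).length := by
  induction cs with
  | nil => rfl
  | cons c r ih =>
    by_cases hc : c = ' '
    · simp [aLead, hc, ih]
    · simp [aLead, hc, (by simpa using hc : ¬ ((c == ' ') = true))]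

theorem trim_eq (phrase : List Char) :
    PySem.Chars.slice phrase (some ((aLead phrase : Nat) : Int))
      (some ((phrase.length - aTrail phrase : Nat) : Int)) = trimSp phrase := by
  rw [PySem.Chars.slice_eq_listSlice, PySem.List.slice_natCast]
  have hsplit : phrase.takeWhile (· == ' ') ++ phrase.dropWhile (· == ' ') = phrase :=
    List.takeWhile_append_dropWhile
  have hdrop : phrase.drop (aLead phrase) = phrase.dropWhile (· == ' ') := by
    rw [aLead_eq]
    clear hsplit
    induction phrase with
    | nil => rfl
    | cons a l ih =>
      by_cases hp : (a == ' ') = true <;>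
        simp [List.takeWhile_cons, List.dropWhile_cons, hp, ih]
  rw [hdrop]
  have htd : trimSp phrase = rdropSp (phrase.dropWhile (· == ' ')) := rfl
  rw [htd]
  by_cases hdn : phrase.dropWhile (· == ' ') = []
  · rw [hdn]
    simp [rdropSp]
  · set d := phrase.dropWhile (· == ' ') with hd
    have hq : rdropSp d ++ List.rtakeWhile (· == ' ') d = d :=
      List.rdropWhile_append_rtakeWhile
    have hhead : ((d.head hdn) == ' ') = false := List.head_dropWhile_not _ hdn
    have hne : ¬ ((d.reverse.takeWhile (· == ' ')).length = d.reverse.length) := by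
      intro hlen
      have heq : d.reverse.takeWhile (· == ' ') = d.reverse :=
        (List.takeWhile_prefix _).eq_of_length hlen
      have : d.head hdn ∈ d.reverse.takeWhile (· == ' ') := by
        rw [heq]; exact List.mem_reverse.mpr (List.head_mem hdn)
      have h2 := List.mem_takeWhile_imp this
      rw [hhead] at h2
      exact Bool.false_ne_true h2
    have htrail : aTrail phrase = (List.rtakeWhile (· == ' ') d).length := by
      unfold aTrail
      rw [aLead_eq]
      have hrev : phrase.reverse = d.reverse ++ (phrase.takeWhile (· == ' ')).reverse := by
        conv_lhs => rw [← hsplit]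
        rw [List.reverse_append]
      rw [hrev, List.takeWhile_append, if_neg hne, List.rtakeWhile, List.length_reverse]
    have hlen : phrase.length = (phrase.takeWhile (· == ' ')).length + d.length := by
      conv_lhs => rw [← hsplit]
      rw [List.length_append]
    have hdlen : d.length = (rdropSp d).length + (List.rtakeWhile (· == ' ') d).length := by
      conv_lhs => rw [← hq]
      rw [List.length_append]
    have harith : phrase.length - aTrail phrase - aLead phrase = (rdropSp d).length := by
      rw [htrail, aLead_eq]
      omega
    rw [harith]
    have := List.take_left (l₁ := rdropSp d) (l₂ := List.rtakeWhile (· == ' ') d)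
    rw [hq] at this
    exact this

theorem splitOn_go_comma : ∀ (fuel : Nat) (l cur acc : List Char) (hacc : List (List Char)) ,
    l.length < fuel →
    PySem.Chars.splitOn.go [','] fuel l cur hacc
      = hacc.reverse ++ (cur.reverse ++ (splitC l).headI) :: (splitC l).tail := by
  intro fuel
  induction fuel with
  | zero => intro l cur acc hacc h; omega
  | succ n ih =>
    intro l cur acc hacc h
    cases l with
    | nil => simp [PySem.Chars.splitOn.go, splitC]
    | cons c rest =>
      by_cases hc : c = ','
      · subst hc
        rw [PySem.Chars.splitOn.go]
        simp only [List.isPrefixOf, List.isPrefixOf_nil_left, Bool.and_true, beq_self_eq_true,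
          if_pos]
        rw [ih _ [] acc _ (by simp at h ⊢; omega)]
        have hht : (splitC rest).headI :: (splitC rest).tail = splitC rest := by
          cases hsr : splitC rest with
          | nil => exact absurd hsr (splitC_ne_nil rest)
          | cons p ps => simp
        have hsc : splitC (',' :: rest) = [] :: splitC rest := by simp [splitC]
        conv_rhs => rw [hsc]
        simp only [List.length_cons, List.length_nil, List.drop_succ_cons, List.drop_zero,
          List.headI_cons, List.tail_cons, List.reverse_cons, List.append_nil, List.reverse_nil,
          List.nil_append]
        rw [← hht]
        simp
      · rw [PySem.Chars.splitOn.go]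
        rw [if_neg (by simp [List.isPrefixOf]; intro hcc; exact hc hcc.symm)]
        rw [ih _ (c :: cur) acc _ (by simp at h ⊢; omega)]
        have : splitC (c :: rest) = (c :: (splitC rest).headI) :: (splitC rest).tail := by
          simp only [splitC, if_neg hc]
          cases hsr : splitC rest with
          | nil => exact absurd hsr (splitC_ne_nil rest)
          | cons p ps => simp
        rw [this]
        simp

theorem splitOn_comma_eq (cs : List Char) : PySem.Chars.splitOn cs [','] = splitC cs := by
  unfold PySem.Chars.splitOn
  rw [splitOn_go_comma (cs.length + 1) cs [] [] [] (by omega)]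
  simp only [List.reverse_nil, List.nil_append]
  exact splitC_headI_tail cs

theorem foldl_acc (ps : List (List Char)) : ∀ (a : List Char),
    ps.foldl (fun acc p => acc ++ p ++ [',', ' ']) a
      = a ++ (ps.map (fun p => p ++ [',', ' '])).flatten := by
  induction ps with
  | nil => intro a; simp
  | cons p ps ih => intro a; simp [ih]

theorem flatten_map_sep (ps : List (List Char)) (h : ps ≠ []) :
    (ps.map (fun p => p ++ [',', ' '])).flatten = joinCS ps ++ [',', ' '] := by
  induction ps with
  | nil => simp at h
  | cons p ps ih =>
    cases ps with
    | nil => simp [joinCS]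
    | cons q r =>
      rw [List.map_cons, List.flatten_cons, ih (by simp)]
      simp [joinCS]

theorem fold_join_eq (ps : List (List Char)) (h : ps ≠ []) :
    PySem.Chars.slice (ps.foldl (fun acc p => acc ++ p ++ [',', ' ']) []) none (some (-2))
      = joinCS ps := by
  rw [PySem.Chars.slice_eq_listSlice, PySem.List.slice_to_neg_ofNat _ 2 (by norm_num),
    foldl_acc, List.nil_append, flatten_map_sep ps h]
  rw [List.length_append]
  simp only [List.length_cons, List.length_nil]
  rw [show (joinCS ps).length + (0 + 1 + 1) - 2 = (joinCS ps).length by omega]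
  exact List.take_left

theorem split₀_go_prop : ∀ (rest cur : List Char) (acc : List (List Char)),
    (∀ w ∈ acc, w ≠ [] ∧ ' ' ∉ w) → ' ' ∉ cur →
    ∀ w ∈ PySem.Chars.split₀.go rest cur acc, w ≠ [] ∧ ' ' ∉ w := by
  intro rest
  induction rest with
  | nil =>
    intro cur acc hacc hcur w hw
    rw [PySem.Chars.split₀.go] at hw
    split at hw
    · exact hacc w (by simpa using hw)
    · simp only [List.mem_reverse, List.mem_cons] at hw
      rcases hw with hw | hw
      · subst hw
        next hne =>
        refine ⟨by simpa using (by simpa [List.isEmpty_iff] using hne), by simpa using hcur⟩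
      · exact hacc w hw
  | cons c rest ih =>
    intro cur acc hacc hcur w hw
    rw [PySem.Chars.split₀.go] at hw
    by_cases hsp : PySem.Chars.isspace c = true
    · rw [if_pos hsp] at hw
      split at hw
      · exact ih [] acc hacc (by simp) w hw
      · next hne =>
        refine ih [] _ ?_ (by simp) w hw
        intro v hv
        rcases List.mem_cons.mp hv with hv | hv
        · subst hv
          exact ⟨by simpa using (by simpa [List.isEmpty_iff] using hne), by simpa using hcur⟩
        · exact hacc v hv
    · rw [if_neg hsp] at hw
      have hc : c ≠ ' ' := by
        intro hcc; subst hcc; exact hsp (by decide)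
      refine ih (c :: cur) acc hacc ?_ w hw
      intro hmem
      rcases List.mem_cons.mp hmem with hv | hv
      · exact hc hv.symm
      · exact hcur hv

theorem split₀_words (u : List Char) :
    ∀ w ∈ PySem.Chars.split₀ u, w ≠ [] ∧ ' ' ∉ w := by
  intro w hw
  exact split₀_go_prop u [] [] (by simp) (by simp) w hw

theorem noDbl_of_no_space {w : List Char} (h : ' ' ∉ w) : NoDbl w := by
  induction w with
  | nil => exact List.IsChain.nil
  | cons c w ih =>
    cases w with
    | nil => exact List.IsChain.singleton c
    | cons d w' =>
      refine List.isChain_cons_cons.mpr ⟨?_, ih (by intro hm; exact h (List.mem_cons_of_mem _ hm))⟩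
      intro hc hd
      subst hc
      exact h List.mem_cons_self

theorem join_head? {v : List Char} (hv : v ≠ []) (r : List (List Char)) :
    (PySem.Chars.join [' '] (v :: r)).head? = v.head? := by
  cases r with
  | nil => rw [PySem.Chars.join_singleton]
  | cons q r' =>
    rw [PySem.Chars.join_cons_cons, List.append_assoc]
    exact List.head?_append_of_ne_nil _ hv

theorem join_ne_nil {v : List Char} (hv : v ≠ []) (r : List (List Char)) :
    PySem.Chars.join [' '] (v :: r) ≠ [] := by
  intro hcontra
  have := join_head? hv r
  rw [hcontra] at this
  cases v with
  | nil => exact hv rfl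
  | cons a w => simp at this

theorem good_join : ∀ (ws : List (List Char)), (∀ w ∈ ws, w ≠ [] ∧ ' ' ∉ w) →
    GoodS (PySem.Chars.join [' '] ws) := by
  intro ws
  induction ws with
  | nil =>
    intro _
    rw [PySem.Chars.join_nil]
    exact ⟨List.IsChain.nil, by simp, by simp⟩
  | cons w ws ih =>
    intro hws
    obtain ⟨hwne, hwsp⟩ := hws w List.mem_cons_self
    cases ws with
    | nil =>
      rw [PySem.Chars.join_singleton]
      refine ⟨noDbl_of_no_space hwsp, ?_, ?_⟩
      · intro hh; exact hwsp (List.mem_of_mem_head? (by rw [hh]; simp))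
      · intro hh; exact hwsp (List.mem_of_getLast? hh)
    | cons v r =>
      obtain ⟨hvne, _⟩ := hws v (by simp)
      obtain ⟨hJ, hJh, hJl⟩ := ih (fun x hx => hws x (List.mem_cons_of_mem _ hx))
      have hJne : PySem.Chars.join [' '] (v :: r) ≠ [] := join_ne_nil hvne r
      rw [PySem.Chars.join_cons_cons, List.append_assoc, List.singleton_append]
      refine ⟨?_, ?_, ?_⟩
      · rw [NoDbl, List.isChain_append]
        refine ⟨noDbl_of_no_space hwsp, ?_, ?_⟩
        · -- IsChain (' ' :: join)
          cases hJc : PySem.Chars.join [' '] (v :: r) with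
          | nil => exact absurd hJc hJne
          | cons a J' =>
            rw [hJc] at hJ hJh
            refine List.isChain_cons_cons.mpr ⟨?_, hJ⟩
            exact fun _ ha => hJh (by rw [ha]; rfl)
        · intro x hx y hy
          simp at hy
          intro hxsp
          subst hxsp
          exact absurd (List.mem_of_getLast? hx) hwsp
      · rw [List.head?_append_of_ne_nil _ hwne]
        intro hh; exact hwsp (List.mem_of_mem_head? (by rw [hh]; simp))
      · rw [show w ++ ' ' :: PySem.Chars.join [' '] (v :: r)
              = (w ++ [' ']) ++ PySem.Chars.join [' '] (v :: r) by simp,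
          List.getLast?_append_of_ne_nil _ hJne]
        exact hJl

theorem joinCS_cons_head (c : Char) (p : List Char) (M : List (List Char)) :
    joinCS ((c :: p) :: M) = c :: joinCS (p :: M) := by
  cases M <;> simp [joinCS]

theorem map_trim_splitC (cs : List Char) :
    (splitC cs).map trimSp = trimSp (splitC cs).headI :: (splitC cs).tail.map trimSp := by
  conv_lhs => rw [← splitC_headI_tail cs]
  rw [List.map_cons]

theorem A2_comma (xs : List Char) : A2 (',' :: xs) = ',' :: ' ' :: A2 xs := by
  unfold A2
  rw [splitC_comma, List.map_cons, map_trim_splitC xs]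
  show joinCS (trimSp [] :: _ :: _) = _
  rw [show trimSp [] = [] from rfl, joinCS, ← map_trim_splitC xs]
  rfl

theorem A2_space (xs : List Char) : A2 (' ' :: xs) = A2 xs := by
  unfold A2
  rw [splitC_cons (by decide) xs, List.map_cons, trimSp_space]
  conv_rhs => rw [map_trim_splitC xs]

theorem A2_cons {c : Char} (hc₁ : c ≠ ',') (hc₂ : c ≠ ' ') (xs : List Char)
    (h : rdropSp (splitC xs).headI = trimSp (splitC xs).headI) :
    A2 (c :: xs) = c :: A2 xs := by
  unfold A2
  rw [splitC_cons hc₁ xs, List.map_cons, trimSp_cons hc₂, h, joinCS_cons_head,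
    ← map_trim_splitC xs]

theorem A2_cons2 {c d : Char} (hc₁ : c ≠ ',') (hc₂ : c ≠ ' ')
    (hd₁ : d ≠ ',') (hd₂ : d ≠ ' ') (r : List Char) :
    A2 (c :: ' ' :: d :: r) = c :: ' ' :: A2 (d :: r) := by
  unfold A2
  rw [splitC_cons hc₁, splitC_cons (by decide : (' ' : Char) ≠ ','), splitC_cons hd₁]
  simp only [List.headI_cons, List.tail_cons, List.map_cons]
  have hdr : rdropSp (d :: (splitC r).headI) ≠ [] := by
    rw [rdropSp_cons_nonspace hd₂]; simp
  rw [trimSp_cons hc₂, rdropSp_cons_of_ne_nil ' ' hdr, rdropSp_cons_nonspace hd₂,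
    joinCS_cons_head, joinCS_cons_head, trimSp_cons hd₂]

theorem head?_ne_space_of_nodbl_space {r : List Char} (h : NoDbl (' ' :: r)) :
    r.head? ≠ some ' ' := by
  cases r with
  | nil => simp
  | cons b r' =>
    have := (List.isChain_cons_cons.mp h).1 rfl
    simpa using this

theorem getLast?_tail {a : Char} {rest : List Char} (h : rest ≠ []) :
    (a :: rest).getLast? = rest.getLast? := by
  cases rest with
  | nil => exact absurd rfl h
  | cons b l => simp

theorem A2_nil : A2 [] = [] := by
  simp [A2, splitC, trimSp, ldropSp, rdropSp, joinCS]

theorem altLoop_nil : altLoop [] = [] := by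
  rw [altLoop]

theorem main_aux : ∀ (n : Nat) (cs : List Char), cs.length ≤ n → GoodS cs →
    A2 cs = altLoop cs := by
  intro n
  induction n with
  | zero =>
    intro cs hlen _
    have : cs = [] := by cases cs <;> simp_all
    subst this
    rw [A2_nil, altLoop_nil]
  | succ n ih =>
    intro cs hlen hgood
    obtain ⟨hchain, hhead, hlast⟩ := hgood
    cases cs with
    | nil => rw [A2_nil, altLoop_nil]
    | cons c rest =>
      have hc2 : c ≠ ' ' := by intro h; subst h; simp at hhead
      by_cases hc1 : c = ','
      · -- c is a comma
        subst hc1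
        rw [altLoop, if_pos rfl, A2_comma]
        cases rest with
        | nil => simp [A2_nil, altLoop_nil]
        | cons b r2 =>
          by_cases hb : b = ' '
          · subst hb
            rw [show (if (' ' :: r2 : List Char).head? = some ' '
                then (' ' :: r2 : List Char).tail else ' ' :: r2) = r2 by simp]
            rw [A2_space]
            have hr2ne : r2 ≠ [] := by
              intro h; subst h; simp at hlast
            have hb2 : r2.head? ≠ some ' ' :=
              head?_ne_space_of_nodbl_space hchain.of_cons
            rw [ih r2 (by simp at hlen ⊢; omega)
              ⟨hchain.of_cons.of_cons, hb2, by
                rw [← getLast?_tail (a := ' ') hr2ne, ← getLast?_tail (a := ',') (by simp)]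
                exact hlast⟩]
          · rw [if_neg (by simpa using hb)]
            have hbne : (b :: r2) ≠ ([] : List Char) := by simp
            rw [ih (b :: r2) (by simp at hlen ⊢; omega)
              ⟨hchain.of_cons, by simpa using hb, by
                rw [← getLast?_tail (a := ',') hbne]; exact hlast⟩]
      · -- c is not a comma (and not a space)
        rw [altLoop, if_neg hc1, if_neg (by simp [hc2])]
        cases rest with
        | nil =>
          rw [A2_cons hc1 hc2 [] rfl, A2_nil, altLoop_nil]
        | cons b r2 =>
          by_cases hb1 : b = ','
          · subst hb1
            rw [A2_cons hc1 hc2 (',' :: r2) (by rw [splitC_comma]; rfl)]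
            have hbne : (',' :: r2) ≠ ([] : List Char) := by simp
            rw [ih (',' :: r2) (by simp at hlen ⊢; omega)
              ⟨hchain.of_cons, by simp, by
                rw [← getLast?_tail (a := c) hbne]; exact hlast⟩]
          · by_cases hb2 : b = ' '
            · subst hb2
              cases r2 with
              | nil => simp at hlast
              | cons d r3 =>
                by_cases hd1 : d = ','
                · subst hd1
                  rw [A2_cons hc1 hc2 (' ' :: ',' :: r3) (by
                    rw [splitC_cons (by decide : (' ' : Char) ≠ ','), splitC_comma]
                    simp only [List.headI_cons, List.headI_nil]
                    rw [rdropSp_space_singleton, trimSp_space]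
                    rfl), A2_space]
                  rw [altLoop, if_neg (by decide),
                    if_pos (by simp : (' ' = ' ' ∧ (',' :: r3).head? = some ','))]
                  have hne : (',' :: r3) ≠ ([] : List Char) := by simp
                  rw [ih (',' :: r3) (by simp at hlen ⊢; omega)
                    ⟨hchain.of_cons.of_cons, by simp, by
                      rw [← getLast?_tail (a := ' ') hne, ← getLast?_tail (a := c) (by simp)]
                      exact hlast⟩]
                · have hd2 : d ≠ ' ' := (List.isChain_cons_cons.mp hchain.of_cons).1 rfl
                  rw [A2_cons2 hc1 hc2 hd1 hd2]
                  rw [altLoop, if_neg (by decide), if_neg (by simp [hd1])]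
                  have hne : (d :: r3) ≠ ([] : List Char) := by simp
                  rw [ih (d :: r3) (by simp at hlen ⊢; omega)
                    ⟨hchain.of_cons.of_cons, by simpa using hd2, by
                      rw [← getLast?_tail (a := ' ') hne, ← getLast?_tail (a := c) (by simp)]
                      exact hlast⟩]
            · rw [A2_cons hc1 hc2 (b :: r2) (by
                rw [splitC_cons hb1]
                simp only [List.headI_cons]
                rw [rdropSp_cons_nonspace hb2, trimSp_cons hb2])]
              have hbne : (b :: r2) ≠ ([] : List Char) := by simp
              rw [ih (b :: r2) (by simp at hlen ⊢; omega)
                ⟨hchain.of_cons, by simpa using hb2, by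
                  rw [← getLast?_tail (a := c) hbne]; exact hlast⟩]

-- ===== VERDICT (by name: the statement is the Claim_ definition above) =====
theorem ocr_cleanup_spec : Claim_equal_ocr_cleanup := by
  intro text _
  unfold Spec_ocr_cleanup ocr_cleanup ocr_cleanup_alt
  dsimp only
  have hfun : (fun phrase : List Char =>
      PySem.Chars.slice phrase (some ((aLead phrase : Nat) : Int))
        (some ((phrase.length - aTrail phrase : Nat) : Int))) = trimSp := funext trim_eq
  rw [hfun]
  set s3 := PySem.Str.join " " (PySem.Str.split₀
      (PySem.Str.replace (PySem.Str.replace text "\n" " ") "\x0C" "")) with hs3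
  have htl : s3.toList = PySem.Chars.join [' ']
      (PySem.Chars.split₀ (PySem.Str.replace (PySem.Str.replace text "\n" " ") "\x0C" "").toList) := by
    rw [hs3, PySem.Str.toList_join, PySem.Str.split₀_map_toList]
    rfl
  have hgood : GoodS s3.toList := by
    rw [htl]
    exact good_join _ (split₀_words _)
  rw [splitOn_comma_eq, fold_join_eq _ (by
    intro hcontra
    exact splitC_ne_nil s3.toList (List.map_eq_nil_iff.mp hcontra))]
  rw [show joinCS ((splitC s3.toList).map trimSp) = A2 s3.toList from rfl]
  rw [main_aux s3.toList.length s3.toList le_rfl hgood]
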